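-- pv_equiv track=rewrite | github.com/lz20061213/SSD-QUAD-LMDB | layers/multibox_target_layer.py | _fetch_gt_boxes
-- ===== SOURCE A (Python) =====
-- def _fetch_gt_boxes(annotations):
--     all_gt_boxes = {}
--     for annotation in annotations:
--         item_id = int(annotation[0])
--         if not item_id in all_gt_boxes:
--             all_gt_boxes[item_id] = []
--         all_gt_boxes[item_id].append(annotation[1:])
--     return all_gt_boxes
-- ===== SOURCE B (Python) =====
-- def _fetch_gt_boxes(annotations):
--     keys = dict.fromkeys(int(a[0]) for a in annotations)
--     return {k: [a[1:] for a in annotations if int(a[0]) == k] for k in keys}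
-- ===== Notes on version B (the rewrite author's own statement) =====
-- stated objective: simpler
-- what changed: Replaces the scan-and-bucket dict mutation with a two-pass comprehension: collect first-occurrence keys with dict.fromkeys, then build each key's bucket by filtering the annotation list once per key.
import Mathlib
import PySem

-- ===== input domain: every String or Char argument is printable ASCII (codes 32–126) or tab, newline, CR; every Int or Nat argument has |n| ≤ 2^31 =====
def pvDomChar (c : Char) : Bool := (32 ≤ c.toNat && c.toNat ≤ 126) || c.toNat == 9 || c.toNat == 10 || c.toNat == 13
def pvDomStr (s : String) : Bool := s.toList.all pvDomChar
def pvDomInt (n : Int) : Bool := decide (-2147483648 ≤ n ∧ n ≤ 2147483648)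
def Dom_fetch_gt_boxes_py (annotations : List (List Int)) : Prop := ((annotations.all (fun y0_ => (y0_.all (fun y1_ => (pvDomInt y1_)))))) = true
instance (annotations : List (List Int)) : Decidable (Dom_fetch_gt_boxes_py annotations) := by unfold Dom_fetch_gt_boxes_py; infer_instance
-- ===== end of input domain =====

-- B replaces A's scan-and-bucket dict mutation by a two-pass comprehension (keys first, then one filter per key); objective: simpler, not faster.

-- ===== PORT A =====
-- annotation[0]; IndexError on an empty row is excluded by Pre_, the default 0 is never used there
def fetch_gt_boxes_py (annotations : List (List Int)) : List (Int × List (List Int)) :=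
  (annotations.foldl (fun all_gt_boxes annotation =>
      let item_id := PySem.List.pyGetD annotation 0 0
      let all_gt_boxes :=
        if all_gt_boxes.contains item_id then all_gt_boxes
        else all_gt_boxes.insert item_id ([] : List (List Int))
      all_gt_boxes.modify item_id [] (fun l => l ++ [PySem.List.slice annotation (some 1) none]))
    PySem.Dict.empty).items

-- ===== PORT B =====
-- dict.fromkeys(… for a in annotations) = ordered dedup of the keys (PySem.List.dedup);
-- {k: [...] for k in keys} = inserting the bucket for each key in order
def fetch_gt_boxes_py_alt (annotations : List (List Int)) : List (Int × List (List Int)) :=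
  let keys := PySem.List.dedup (annotations.map (fun a => PySem.List.pyGetD a 0 0))
  (keys.foldl (fun d k =>
      d.insert k ((annotations.filter (fun a => PySem.List.pyGetD a 0 0 == k)).map
        (fun a => PySem.List.slice a (some 1) none)))
    PySem.Dict.empty).items

-- ===== PRECONDITION & SPEC =====
-- Pre_ excludes inputs containing an empty annotation row: there 'annotation[0]' raises IndexError in A (and in B alike).
def Pre_fetch_gt_boxes_py (annotations : List (List Int)) : Prop := ∀ a ∈ annotations, a ≠ []
instance (annotations : List (List Int)) : Decidable (Pre_fetch_gt_boxes_py annotations) := by unfold Pre_fetch_gt_boxes_py; infer_instance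
def pvWitness_fetch_gt_boxes_py : List (List Int) := [[1, 10, 20], [2, 30], [1, 40, 50]]

def Spec_fetch_gt_boxes_py (annotations : List (List Int)) (out : List (Int × List (List Int))) : Prop := out = fetch_gt_boxes_py_alt annotations
instance (annotations : List (List Int)) (out : List (Int × List (List Int))) : Decidable (Spec_fetch_gt_boxes_py annotations out) := by unfold Spec_fetch_gt_boxes_py; infer_instance

-- ===== CLAIM (what is proved, stated in full; the proofs are below) =====
def Claim_equal_fetch_gt_boxes_py : Prop := ∀ (annotations : List (List Int)), Dom_fetch_gt_boxes_py annotations → Pre_fetch_gt_boxes_py annotations → Spec_fetch_gt_boxes_py annotations (fetch_gt_boxes_py annotations)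

-- ===== LEMMAS AND PROOFS =====

-- A's "ensure key, then append" step is exactly Dict.modify with default [].
theorem pv_step_eq (d : PySem.Dict Int (List (List Int))) (k : Int) (f : List (List Int) → List (List Int)) :
    (if d.contains k then d else d.insert k []).modify k [] f = d.modify k [] f := by
  by_cases h : d.contains k
  · simp [h]
  · have h' : d.contains k = false := by simpa using h
    simp [h, PySem.Dict.modify, PySem.Dict.insert_insert_self,
      PySem.Dict.getD_of_not_contains (h := h')]

theorem pv_main (annotations : List (List Int)) :
    fetch_gt_boxes_py annotations = fetch_gt_boxes_py_alt annotations := by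
  unfold fetch_gt_boxes_py fetch_gt_boxes_py_alt
  have hstep : (fun (all_gt_boxes : PySem.Dict Int (List (List Int))) (annotation : List Int) =>
      let item_id := PySem.List.pyGetD annotation 0 0
      let all_gt_boxes :=
        if all_gt_boxes.contains item_id then all_gt_boxes
        else all_gt_boxes.insert item_id ([] : List (List Int))
      all_gt_boxes.modify item_id [] (fun l => l ++ [PySem.List.slice annotation (some 1) none]))
      = fun d a => d.modify (PySem.List.pyGetD a 0 0) []
        (fun l => l ++ [PySem.List.slice a (some 1) none]) := by
    funext d a; exact pv_step_eq d _ _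
  rw [hstep]
  set key : List Int → Int := fun a => PySem.List.pyGetD a 0 0 with hkey
  set tail : List Int → List Int := fun a => PySem.List.slice a (some 1) none with htail
  set keys := PySem.List.dedup (annotations.map key) with hkeys
  set bucket : Int → List (List Int) :=
    fun k => (annotations.filter (fun a => key a == k)).map tail with hbucket
  set D := annotations.foldl
      (fun d a => d.modify (key a) [] (fun l => l ++ [tail a])) PySem.Dict.empty with hD
  have hnd : D.keys.Nodup := by
    rw [hD]
    exact PySem.Dict.nodup_keys_foldl_modify_key annotations key []
      (fun _ a => fun l => l ++ [tail a]) PySem.Dict.empty (PySem.Dict.nodup_keys_empty)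
  have hk : D.keys = keys := by
    rw [hD]
    rw [PySem.Dict.keys_foldl_modify_key annotations key []
      (fun _ a => fun l => l ++ [tail a]) PySem.Dict.empty]
    rw [hkeys, PySem.List.dedup_eq_ofList, PySem.Set.ofList_eq_foldl]
    simp [PySem.Dict.keys_empty, PySem.Set.update]
  have hg : ∀ c, D.getD c [] = bucket c := by
    intro c
    rw [hD]
    have hm : annotations.foldl
        (fun d a => d.modify (key a) [] (fun l => l ++ [tail a])) PySem.Dict.empty
        = (annotations.map (fun a => (key a, tail a))).foldl
          (fun d p => d.modify p.1 [] (fun l => l ++ [p.2])) PySem.Dict.empty := by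
      rw [List.foldl_map]
    rw [hm, PySem.Dict.getD_foldl_modify_append]
    simp [PySem.Dict.getD_empty, List.filter_map, hbucket, Function.comp_def]
  have hA : D.items = keys.map (fun k => (k, bucket k)) := by
    rw [PySem.Dict.items_eq_map_keys D hnd [], hk]
    exact List.map_congr_left (fun k _ => by rw [hg k])
  have hB : (keys.foldl (fun d k => d.insert k (bucket k)) PySem.Dict.empty).items
      = keys.map (fun k => (k, bucket k)) := by
    have := PySem.Dict.items_foldl_insert_fresh keys (fun k => k) bucket PySem.Dict.empty
      (fun a _ => PySem.Dict.contains_empty a)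
      (by rw [show (fun (k : Int) => k) = id from rfl, List.map_id]
          exact hkeys ▸ PySem.List.nodup_dedup (annotations.map key))
    simpa using this
  simpa [hA] using hB.symm

-- ===== VERDICT (by name: the statement is the Claim_ definition above) =====
theorem fetch_gt_boxes_py_spec : Claim_equal_fetch_gt_boxes_py := by
  intro annotations _ _
  unfold Spec_fetch_gt_boxes_py
  exact pv_main annotations
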